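-- pv_equiv track=rewrite | github.com/jumpei00/interviews | coding/16_hash_table/maximum_frequency_difference.py | maximum_frequency_difference
-- ===== SOURCE A (Python) =====
-- from typing import List
-- from collections import defaultdict
--
-- def maximum_frequency_difference(nums: List[int]) -> int:
--     counter_map = defaultdict(int)
--     most_frequency_diff_count = 0
--
--     for i in range(len(nums) - 1):
--         diff = abs(nums[i] - nums[i + 1])
--         counter_map[diff] += 1
--
--         if counter_map[diff] > most_frequency_diff_count:
--             most_frequency_diff_count = counter_map[diff]
--
--     return most_frequency_diff_count
-- ===== SOURCE B (Python) =====
-- from typing import List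
--
-- def maximum_frequency_difference(nums: List[int]) -> int:
--     # Sort the consecutive absolute differences, then find the longest run
--     # of equal values: in a sorted list that run length is the max frequency.
--     diffs = sorted(abs(a - b) for a, b in zip(nums, nums[1:]))
--     best = 0
--     run = 0
--     prev = None
--     for d in diffs:
--         if prev is not None and d == prev:
--             run += 1
--         else:
--             run = 1
--         prev = d
--         if run > best:
--             best = run
--     return best
-- ===== Notes on version B (the rewrite author's own statement) =====
-- stated objective: alternative
-- what changed: A counts each consecutive absolute difference in a hash map and tracks the running maximum count inline; B uses no counting table at all: it sorts the list of consecutive absolute differences and returns the length of the longest run of equal values in the sorted list, which equals the maximum frequency.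
import Mathlib
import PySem

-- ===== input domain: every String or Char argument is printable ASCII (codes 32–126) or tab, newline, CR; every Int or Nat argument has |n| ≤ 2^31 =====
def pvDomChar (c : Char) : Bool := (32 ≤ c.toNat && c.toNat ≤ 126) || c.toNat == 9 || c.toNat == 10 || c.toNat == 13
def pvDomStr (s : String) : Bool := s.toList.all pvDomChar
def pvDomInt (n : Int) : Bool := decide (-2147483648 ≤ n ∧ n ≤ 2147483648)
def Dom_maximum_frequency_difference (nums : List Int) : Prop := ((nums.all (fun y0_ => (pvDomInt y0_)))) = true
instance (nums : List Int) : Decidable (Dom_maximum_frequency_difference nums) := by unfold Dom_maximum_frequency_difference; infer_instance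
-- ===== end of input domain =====

-- B replaces A's hash-map counting with a sort: it sorts the consecutive absolute
-- differences and returns the longest run of equal values in the sorted list.

-- ===== PORT A =====
def maximum_frequency_difference (nums : List Int) : Int :=
  ((PySem.List.pyRange 0 ((nums.length : Int) - 1) 1).foldl
    (fun (st : PySem.Dict Int Int × Int) i =>
      let diff := |PySem.List.pyGetD nums i 0 - PySem.List.pyGetD nums (i + 1) 0|
      let cm := st.1.modify diff 0 (· + 1)
      let c := cm.getD diff 0
      if c > st.2 then (cm, c) else (cm, st.2))
    (PySem.Dict.empty, 0)).2

-- ===== PORT B =====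
-- state is (best, run, prev); `prev is not None and d == prev` is the match on prev
def maximum_frequency_difference_alt (nums : List Int) : Int :=
  let diffs := PySem.List.sorted
    ((nums.zip (PySem.List.slice nums (some 1) none)).map (fun p => |p.1 - p.2|))
    (fun x => x) false
  (diffs.foldl
    (fun (st : Int × Int × Option Int) d =>
      let run := match st.2.2 with
        | some p => if d = p then st.2.1 + 1 else 1
        | none => 1
      (if run > st.1 then run else st.1, run, some d))
    (0, 0, none)).1

-- ===== PRECONDITION & SPEC =====
def Spec_maximum_frequency_difference (nums : List Int) (out : Int) : Prop := out = maximum_frequency_difference_alt nums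
instance (nums : List Int) (out : Int) : Decidable (Spec_maximum_frequency_difference nums out) := by unfold Spec_maximum_frequency_difference; infer_instance

-- ===== CLAIM =====
def Claim_equal_maximum_frequency_difference : Prop := ∀ (nums : List Int), Dom_maximum_frequency_difference nums → Spec_maximum_frequency_difference nums (maximum_frequency_difference nums)

-- ===== LEMMAS AND PROOFS =====

-- A's loop body over an already-computed difference value
def pvStep (st : PySem.Dict Int Int × Int) (diff : Int) : PySem.Dict Int Int × Int :=
  let cm := st.1.modify diff 0 (· + 1)
  let c := cm.getD diff 0
  if c > st.2 then (cm, c) else (cm, st.2)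

-- B's loop body
def pvStepB (st : Int × Int × Option Int) (d : Int) : Int × Int × Option Int :=
  let run := match st.2.2 with
    | some p => if d = p then st.2.1 + 1 else 1
    | none => 1
  (if run > st.1 then run else st.1, run, some d)

-- invariant of A's loop: the dict is the counting fold, and the running max bounds and is realized by the dict values
theorem pvA_inv (L : List Int) : ∀ (d : PySem.Dict Int Int) (m : Int),
    (∀ k, d.getD k 0 ≤ m) → (m = 0 ∨ ∃ k, d.getD k 0 = m) →
    (L.foldl pvStep (d, m)).1 = L.foldl (fun d x => d.modify x 0 (· + 1)) d
    ∧ m ≤ (L.foldl pvStep (d, m)).2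
    ∧ (∀ k, (L.foldl pvStep (d, m)).1.getD k 0 ≤ (L.foldl pvStep (d, m)).2)
    ∧ ((L.foldl pvStep (d, m)).2 = 0 ∨ ∃ k, (L.foldl pvStep (d, m)).1.getD k 0 = (L.foldl pvStep (d, m)).2) := by
  induction L with
  | nil => intro d m h1 h2; exact ⟨rfl, le_refl m, h1, h2⟩
  | cons x L ih =>
    intro d m h1 h2
    simp only [List.foldl_cons]
    have hc : (d.modify x 0 (· + 1)).getD x 0 = d.getD x 0 + 1 := PySem.Dict.getD_modify_self d x 0 _
    by_cases hgt : (d.modify x 0 (· + 1)).getD x 0 > m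
    · have hstep : pvStep (d, m) x = (d.modify x 0 (· + 1), (d.modify x 0 (· + 1)).getD x 0) := by
        simp only [pvStep, if_pos hgt]
      rw [hstep]
      have h1' : ∀ k, (d.modify x 0 (· + 1)).getD k 0 ≤ (d.modify x 0 (· + 1)).getD x 0 := by
        intro k
        by_cases hk : k = x
        · subst hk; exact le_refl _
        · rw [PySem.Dict.getD_modify_of_ne d 0 _ hk]
          have := h1 k; omega
      obtain ⟨ha, hb, hcc, hd⟩ := ih (d.modify x 0 (· + 1)) _ h1' (Or.inr ⟨x, rfl⟩)
      exact ⟨ha, le_trans (le_of_lt hgt) hb, hcc, hd⟩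
    · have hstep : pvStep (d, m) x = (d.modify x 0 (· + 1), m) := by
        simp only [pvStep, if_neg hgt]
      rw [hstep]
      have h1' : ∀ k, (d.modify x 0 (· + 1)).getD k 0 ≤ m := by
        intro k
        by_cases hk : k = x
        · subst hk; omega
        · rw [PySem.Dict.getD_modify_of_ne d 0 _ hk]; exact h1 k
      have h2' : m = 0 ∨ ∃ k, (d.modify x 0 (· + 1)).getD k 0 = m := by
        rcases h2 with h0 | ⟨k, hk⟩
        · exact Or.inl h0
        · by_cases hkx : k = x
          · subst hkx; omega
          · refine Or.inr ⟨k, ?_⟩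
            rw [PySem.Dict.getD_modify_of_ne d 0 _ hkx]; exact hk
      exact ih (d.modify x 0 (· + 1)) m h1' h2'

-- A's result over a difference list L is characterized by the multiset counts of L
theorem pvA_char (L : List Int) :
    (∀ k, (L.count k : Int) ≤ (L.foldl pvStep (PySem.Dict.empty, 0)).2)
    ∧ ((L.foldl pvStep (PySem.Dict.empty, 0)).2 = 0
        ∨ ∃ k, (L.count k : Int) = (L.foldl pvStep (PySem.Dict.empty, 0)).2) := by
  obtain ⟨ha, _, hcc, hd⟩ := pvA_inv L PySem.Dict.empty 0
    (fun k => by simp [PySem.Dict.getD_empty]) (Or.inl rfl)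
  rw [← PySem.Dict.counter_eq_foldl] at ha
  rw [ha] at hcc hd
  constructor
  · intro k
    have := hcc k
    rwa [PySem.Dict.getD_counter] at this
  · rcases hd with h0 | ⟨k, hk⟩
    · exact Or.inl h0
    · refine Or.inr ⟨k, ?_⟩
      rwa [PySem.Dict.getD_counter] at hk
-- invariant of B's run scan: processed prefix P, prev = last-of-run p, run = count of p in P
theorem pvB_inv (xs : List Int) : ∀ (P : List Int) (p best : Int),
    xs.Pairwise (· ≤ ·) → (∀ b ∈ xs, p ≤ b) → (∀ a ∈ P, a ≤ p) → p ∈ P →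
    (∀ k, ((P.count k : Int)) ≤ best) → (∃ k, ((P.count k : Int)) = best) →
    (∀ k, (((P ++ xs).count k : Int)) ≤ (xs.foldl pvStepB (best, (P.count p : Int), some p)).1)
    ∧ (∃ k, (((P ++ xs).count k : Int)) = (xs.foldl pvStepB (best, (P.count p : Int), some p)).1) := by
  induction xs with
  | nil => intro P p best _ _ _ _ h5 h6; simpa using ⟨h5, h6⟩
  | cons d xs ih =>
    intro P p best hpw hge hle hmem h5 h6
    have hpd : p ≤ d := hge d (by simp)
    have hxs_ge_d : ∀ b ∈ xs, d ≤ b := fun b hb => (List.pairwise_cons.mp hpw).1 b hb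
    have hxs_pw : xs.Pairwise (· ≤ ·) := (List.pairwise_cons.mp hpw).2
    simp only [List.foldl_cons]
    by_cases hdp : d = p
    · subst hdp
      have hstep : pvStepB (best, (P.count d : Int), some d) d
          = (if (P.count d : Int) + 1 > best then (P.count d : Int) + 1 else best,
             (P.count d : Int) + 1, some d) := by
        simp [pvStepB]
      rw [hstep]
      set best' : Int := if (P.count d : Int) + 1 > best then (P.count d : Int) + 1 else best with hbest'
      have hcnt : ((P ++ [d]).count d : Int) = (P.count d : Int) + 1 := by
        simp [List.count_append]
      have h5' : ∀ k, (((P ++ [d]).count k : Int)) ≤ best' := by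
        intro k
        by_cases hk : k = d
        · subst hk; rw [hcnt, hbest']; split <;> omega
        · have : (P ++ [d]).count k = P.count k := by
            simp [List.count_append, Ne.symm hk]
          rw [this, hbest']
          have := h5 k
          split <;> omega
      have h6' : ∃ k, (((P ++ [d]).count k : Int)) = best' := by
        rw [hbest']
        by_cases hb : (P.count d : Int) + 1 > best
        · exact ⟨d, by rw [hcnt]; simp [hb]⟩
        · obtain ⟨k0, hk0⟩ := h6
          have hk0d : k0 ≠ d := by
            intro h; rw [h] at hk0
            have := h5 d; omega
          refine ⟨k0, ?_⟩
          have : (P ++ [d]).count k0 = P.count k0 := by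
            simp [List.count_append, Ne.symm hk0d]
          rw [this, hk0]; simp [hb]
      have hrun : (P.count d : Int) + 1 = ((P ++ [d]).count d : Int) := hcnt.symm
      have := ih (P ++ [d]) d best' hxs_pw hxs_ge_d
        (by intro a ha; rcases List.mem_append.mp ha with h | h
            · exact le_trans (hle a h) hpd
            · simp at h; omega)
        (by simp) h5' h6'
      rw [hrun]
      simpa [List.append_assoc] using this
    · have hpltd : p < d := lt_of_le_of_ne hpd (fun h => hdp h.symm)
      have hstep : pvStepB (best, (P.count p : Int), some p) d
          = (if (1 : Int) > best then 1 else best, 1, some d) := by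
        simp [pvStepB, hdp]
      rw [hstep]
      set best' : Int := if (1 : Int) > best then 1 else best with hbest'
      have hPd : P.count d = 0 := by
        rw [List.count_eq_zero]
        intro hd
        have := hle d hd; omega
      have hcnt : ((P ++ [d]).count d : Int) = 1 := by
        simp [List.count_append, hPd]
      have h5' : ∀ k, (((P ++ [d]).count k : Int)) ≤ best' := by
        intro k
        by_cases hk : k = d
        · subst hk; rw [hcnt, hbest']; split <;> omega
        · have : (P ++ [d]).count k = P.count k := by
            simp [List.count_append, Ne.symm hk]
          rw [this, hbest']
          have := h5 k
          split <;> omega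
      have h6' : ∃ k, (((P ++ [d]).count k : Int)) = best' := by
        rw [hbest']
        by_cases hb : (1 : Int) > best
        · exact ⟨d, by rw [hcnt]; simp [hb]⟩
        · obtain ⟨k0, hk0⟩ := h6
          have hk0d : k0 ≠ d := by
            intro h; rw [h] at hk0
            rw [hPd] at hk0
            simp at hk0
            omega
          refine ⟨k0, ?_⟩
          have : (P ++ [d]).count k0 = P.count k0 := by
            simp [List.count_append, Ne.symm hk0d]
          rw [this, hk0]; simp [hb]
      have hrun : (1 : Int) = ((P ++ [d]).count d : Int) := hcnt.symm
      have := ih (P ++ [d]) d best' hxs_pw hxs_ge_d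
        (by intro a ha; rcases List.mem_append.mp ha with h | h
            · exact le_of_lt (lt_of_le_of_lt (hle a h) hpltd)
            · simp at h; omega)
        (by simp) h5' h6'
      rw [hrun]
      simpa [List.append_assoc] using this

-- B's run scan over a sorted list is characterized by the multiset counts
theorem pvB_char (S : List Int) (hpw : S.Pairwise (· ≤ ·)) :
    (∀ k, (S.count k : Int) ≤ (S.foldl pvStepB (0, 0, none)).1)
    ∧ ((S.foldl pvStepB (0, 0, none)).1 = 0
        ∨ ∃ k, (S.count k : Int) = (S.foldl pvStepB (0, 0, none)).1) := by
  rcases S with _ | ⟨d, rest⟩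
  · exact ⟨fun k => by simp, Or.inl rfl⟩
  · simp only [List.foldl_cons]
    have hstep : pvStepB (0, 0, none) d = (1, 1, some d) := by simp [pvStepB]
    rw [hstep]
    obtain ⟨h1, h2⟩ := pvB_inv rest [d] d 1
      (List.pairwise_cons.mp hpw).2
      (List.pairwise_cons.mp hpw).1
      (by simp) (by simp)
      (fun k => by
        rcases eq_or_ne k d with hk | hk
        · simp [hk]
        · simp [Ne.symm hk])
      ⟨d, by simp⟩
    have e : (([d].count d : Int)) = 1 := by simp
    rw [e] at h1 h2
    constructor
    · intro k
      have := h1 k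
      simpa using this
    · obtain ⟨k, hk⟩ := h2
      exact Or.inr ⟨k, by simpa using hk⟩

-- two values satisfying the max-count characterization over the same counts are equal
theorem pvChar_unique (c : Int → Int) (hc : ∀ k, 0 ≤ c k) (M R : Int)
    (h1 : ∀ k, c k ≤ M) (h2 : M = 0 ∨ ∃ k, c k = M)
    (h3 : ∀ k, c k ≤ R) (h4 : R = 0 ∨ ∃ k, c k = R) : M = R := by
  rcases h2 with hM | ⟨k1, hk1⟩ <;> rcases h4 with hR | ⟨k2, hk2⟩
  · omega
  · have := h1 k2; have := hc k2; omega
  · have := h3 k1; have := hc k1; omega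
  · have := h3 k1; have := h1 k2; omega

-- the index loop of A reads exactly the consecutive differences
theorem pvRange_map_eq (nums : List Int) :
    (PySem.List.pyRange 0 ((nums.length : Int) - 1) 1).map
      (fun i => |PySem.List.pyGetD nums i 0 - PySem.List.pyGetD nums (i + 1) 0|)
    = (nums.zip nums.tail).map (fun p => |p.1 - p.2|) := by
  apply List.ext_getElem
  · simp only [List.length_map, PySem.List.length_pyRange_one, List.length_zip, List.length_tail]
    omega
  · intro k h1 h2
    simp only [List.getElem_map, PySem.List.getElem_pyRange_one, zero_add]
    have hlen : k + 1 < nums.length := by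
      simp [PySem.List.length_pyRange_one] at h1; omega
    have hk : k < nums.length := by omega
    have e1 : PySem.List.pyGetD nums ((k : Int)) 0 = nums[k] := by
      rw [PySem.List.pyGetD_natCast]; simp [List.getD, hk]
    have e2 : PySem.List.pyGetD nums ((k : Int) + 1) 0 = nums[k + 1] := by
      have h3 : ((k : Int) + 1) = ((k + 1 : Nat) : Int) := by push_cast; ring
      rw [h3, PySem.List.pyGetD_natCast]; simp [List.getD, hlen]
    rw [e1, e2]
    simp [List.getElem_zip, List.getElem_tail]

-- ===== VERDICT =====
theorem maximum_frequency_difference_spec : Claim_equal_maximum_frequency_difference := by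
  intro nums _
  unfold Spec_maximum_frequency_difference maximum_frequency_difference maximum_frequency_difference_alt
  rw [PySem.List.slice_from_one]
  set L : List Int := (nums.zip nums.tail).map (fun p => |p.1 - p.2|) with hL
  have hfold :
      (PySem.List.pyRange 0 ((nums.length : Int) - 1) 1).foldl
        (fun (st : PySem.Dict Int Int × Int) i =>
          let diff := |PySem.List.pyGetD nums i 0 - PySem.List.pyGetD nums (i + 1) 0|
          let cm := st.1.modify diff 0 (· + 1)
          let c := cm.getD diff 0
          if c > st.2 then (cm, c) else (cm, st.2))
        (PySem.Dict.empty, 0)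
      = L.foldl pvStep (PySem.Dict.empty, 0) := by
    rw [hL, ← pvRange_map_eq, List.foldl_map]
    rfl
  rw [hfold]
  set S : List Int := PySem.List.sorted L (fun x => x) false with hS
  have hperm : S.Perm L := PySem.List.sorted_perm L _ _
  have hcount : ∀ k, S.count k = L.count k := fun k => hperm.count_eq k
  have hSpw : S.Pairwise (· ≤ ·) := by
    have := PySem.List.sorted_pairwise L (fun x => x)
    simpa using this
  obtain ⟨hA1, hA2⟩ := pvA_char L
  obtain ⟨hB1, hB2⟩ := pvB_char S hSpw
  simp only [hcount] at hB1 hB2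
  exact pvChar_unique (fun k => (L.count k : Int)) (fun k => by positivity) _ _
    hA1 hA2 hB1 hB2
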